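-- pv_equiv track=rewrite | github.com/rick0693/DONA_SORTE | blaze_bot.py | gerar_dica_alternativa
-- ===== SOURCE A (Python) =====
-- def gerar_dica_alternativa(cores):
--     """Gera uma dica alternativa baseada em padrões simples."""
--     if len(cores) < 3:
--         return None, None
--     color1, color2, color3 = cores[-3:]
--     padroes = {
--         (1, 1, 1): (2, "VVV"), (2, 2, 2): (1, "PPP"),
--         (1, 1, 2): (1, "VVP"), (2, 2, 1): (2, "PPV"),
--         (1, 2, 2): (2, "VPP"), (2, 1, 1): (1, "PVV"),
--         (1, 2, 1): (1, "VPV"), (2, 1, 2): (2, "PVP"),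
--         (0, None, None): (2, "Branco Terceiro"),
--         (None, 0, None): (1, "Branco Penúltimo"),
--         (None, None, 0): (1, "Branco Último")
--     }
--     for padrao, (dica, origem) in padroes.items():
--         if (color1 == padrao[0] and (padrao[1] is None or color2 == padrao[1]) and
--             (padrao[2] is None or color3 == padrao[2])):
--             return dica, f"Alternativa - {origem}"
--     return None, None
-- ===== SOURCE B (Python) =====
-- _EXATOS = {
--     (1, 1, 1): (2, "VVV"), (2, 2, 2): (1, "PPP"),
--     (1, 1, 2): (1, "VVP"), (2, 2, 1): (2, "PPV"),
--     (1, 2, 2): (2, "VPP"), (2, 1, 1): (1, "PVV"),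
--     (1, 2, 1): (1, "VPV"), (2, 1, 2): (2, "PVP"),
-- }
--
--
-- def gerar_dica_alternativa(cores):
--     """Gera uma dica alternativa baseada em padrões simples."""
--     if len(cores) < 3:
--         return None, None
--     c1, c2, c3 = cores[-3:]
--     hit = _EXATOS.get((c1, c2, c3))
--     if hit is None:
--         if c1 == 0:
--             hit = (2, "Branco Terceiro")
--         elif c2 == 0:
--             hit = (1, "Branco Penúltimo")
--         elif c3 == 0:
--             hit = (1, "Branco Último")
--     if hit is None:
--         return None, None
--     dica, origem = hit
--     return dica, f"Alternativa - {origem}"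
-- ===== Notes on version B (the rewrite author's own statement) =====
-- stated objective: simpler
-- what changed: Replaces the single wildcard-matching scan over a mixed dict with an exact-tuple dict lookup followed by an ordered chain of three white-position checks, which also makes the Penultimo/Ultimo branches reachable as intended.
-- intended difference: On inputs of length >= 3 whose third-from-last color is nonzero while the second-from-last or last color is 0, A returns (None, None) because its comparison color1 == None can never be true so the 'Branco Penultimo'/'Branco Ultimo' dict entries are dead, while B returns (1, 'Alternativa - Branco Penúltimo') or (1, 'Alternativa - Branco Último'), the hints those entries were evidently written to produce. — e.g. on gerar_dica_alternativa([1, 0, 0]): A returns (none, none), B returns (some 1, some "Alternativa - Branco Penúltimo")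
import Mathlib
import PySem

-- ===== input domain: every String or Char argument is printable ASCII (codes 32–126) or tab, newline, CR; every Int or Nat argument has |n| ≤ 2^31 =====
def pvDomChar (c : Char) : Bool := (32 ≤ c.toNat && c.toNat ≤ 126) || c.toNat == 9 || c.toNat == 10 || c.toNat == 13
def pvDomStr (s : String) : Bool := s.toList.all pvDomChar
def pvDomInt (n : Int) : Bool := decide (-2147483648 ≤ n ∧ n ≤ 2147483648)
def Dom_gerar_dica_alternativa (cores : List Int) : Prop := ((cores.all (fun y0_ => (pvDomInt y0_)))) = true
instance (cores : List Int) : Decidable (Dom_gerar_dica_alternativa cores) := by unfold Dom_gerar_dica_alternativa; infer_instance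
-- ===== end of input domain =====

-- B replaces A's wildcard-matching dict scan by an exact-tuple lookup plus an ordered chain of
-- white-position checks (simpler); B intentionally fixes A's dead "Branco Penúltimo/Último" branches (see D_).


-- ===== PORT A =====
-- A's dict of patterns: keys are Option Int triples (None = wildcard, except position 0, which A
-- compares with == directly, so a None there can never match an Int).
def pvPadroes : List ((Option Int × Option Int × Option Int) × (Int × String)) :=
  [((some 1, some 1, some 1), (2, "VVV")), ((some 2, some 2, some 2), (1, "PPP")),
   ((some 1, some 1, some 2), (1, "VVP")), ((some 2, some 2, some 1), (2, "PPV")),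
   ((some 1, some 2, some 2), (2, "VPP")), ((some 2, some 1, some 1), (1, "PVV")),
   ((some 1, some 2, some 1), (1, "VPV")), ((some 2, some 1, some 2), (2, "PVP")),
   ((some 0, none, none), (2, "Branco Terceiro")),
   ((none, some 0, none), (1, "Branco Penúltimo")),
   ((none, none, some 0), (1, "Branco Último"))]

-- the 'for padrao, (dica, origem) in padroes.items(): if …: return …' loop
def pvLoopA (c1 c2 c3 : Int) :
    List ((Option Int × Option Int × Option Int) × (Int × String)) → Option Int × Option String
  | [] => (none, none)
  | (p, (dica, origem)) :: rest =>
    if (some c1 == p.1) && (p.2.1 == none || some c2 == p.2.1)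
        && (p.2.2 == none || some c3 == p.2.2) then
      (some dica, some ("Alternativa - " ++ origem))
    else pvLoopA c1 c2 c3 rest

def gerar_dica_alternativa (cores : List Int) : Option Int × Option String :=
  if cores.length < 3 then (none, none)
  else
    match PySem.List.slice cores (some (-3)) none with  -- cores[-3:]
    | [c1, c2, c3] => pvLoopA c1 c2 c3 pvPadroes
    | _ => (none, none)  -- unreachable: the slice has exactly 3 elements

-- ===== PORT B =====
def pvExatos : PySem.Dict (Int × Int × Int) (Int × String) :=
  PySem.Dict.ofList
  [((1, 1, 1), (2, "VVV")), ((2, 2, 2), (1, "PPP")),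
   ((1, 1, 2), (1, "VVP")), ((2, 2, 1), (2, "PPV")),
   ((1, 2, 2), (2, "VPP")), ((2, 1, 1), (1, "PVV")),
   ((1, 2, 1), (1, "VPV")), ((2, 1, 2), (2, "PVP"))]

-- the unpacking 'c1, c2, c3 = cores[-3:]' (none = unreachable ValueError)
def pvUnpack3 (l : List Int) : Option (Int × Int × Int) :=
  if l.length = 3 then some (l.getD 0 0, l.getD 1 0, l.getD 2 0) else none

def gerar_dica_alternativa_alt (cores : List Int) : Option Int × Option String :=
  if cores.length < 3 then (none, none)
  else
    match pvUnpack3 (PySem.List.slice cores (some (-3)) none) with  -- cores[-3:]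
    | some (c1, c2, c3) =>
      let hit :=
        match PySem.Dict.get? pvExatos (c1, c2, c3) with
        | some p => some p
        | none =>
          if c1 == 0 then some ((2 : Int), "Branco Terceiro")
          else if c2 == 0 then some ((1 : Int), "Branco Penúltimo")
          else if c3 == 0 then some ((1 : Int), "Branco Último")
          else none
      match hit with
      | some (dica, origem) => (some dica, some ("Alternativa - " ++ origem))
      | none => (none, none)
    | none => (none, none)  -- unreachable

-- ===== PRECONDITION & SPEC =====
-- On inputs of length ≥ 3 whose third-from-last color is nonzero while the second-from-last or last
-- color is 0, A returns (none, none) because its 'color1 == padrao[0]' comparison makes the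
-- 'Branco Penúltimo'/'Branco Último' dict entries dead code, while B returns the hint those entries
-- were evidently written to produce; B's value is the intended one.
def D_gerar_dica_alternativa (cores : List Int) : Prop :=
  3 ≤ cores.length ∧
  (cores.drop (cores.length - 3)).getD 0 0 ≠ 0 ∧
  ((cores.drop (cores.length - 3)).getD 1 0 = 0 ∨ (cores.drop (cores.length - 3)).getD 2 0 = 0)
instance (cores : List Int) : Decidable (D_gerar_dica_alternativa cores) := by
  unfold D_gerar_dica_alternativa; infer_instance

def Spec_gerar_dica_alternativa (cores : List Int) (out : Option Int × Option String) : Prop :=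
  ¬ D_gerar_dica_alternativa cores → out = gerar_dica_alternativa_alt cores
instance (cores : List Int) (out : Option Int × Option String) : Decidable (Spec_gerar_dica_alternativa cores out) := by
  unfold Spec_gerar_dica_alternativa; infer_instance

def pvDiffWitness_gerar_dica_alternativa : List Int := [1, 0, 0]
def pvDiffWitnessOut_gerar_dica_alternativa :
    (Option Int × Option String) × (Option Int × Option String) :=
  ((none, none), (some 1, some "Alternativa - Branco Penúltimo"))

-- ===== CLAIM (what is proved, stated in full; the proofs are below) =====
def Claim_unchanged_gerar_dica_alternativa : Prop := ∀ (cores : List Int), Dom_gerar_dica_alternativa cores → Spec_gerar_dica_alternativa cores (gerar_dica_alternativa cores)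
def Claim_changed_gerar_dica_alternativa : Prop := Dom_gerar_dica_alternativa (pvDiffWitness_gerar_dica_alternativa) ∧ D_gerar_dica_alternativa (pvDiffWitness_gerar_dica_alternativa) ∧ gerar_dica_alternativa (pvDiffWitness_gerar_dica_alternativa) = pvDiffWitnessOut_gerar_dica_alternativa.1 ∧ gerar_dica_alternativa_alt (pvDiffWitness_gerar_dica_alternativa) = pvDiffWitnessOut_gerar_dica_alternativa.2 ∧ pvDiffWitnessOut_gerar_dica_alternativa.1 ≠ pvDiffWitnessOut_gerar_dica_alternativa.2
def Claim_exact_gerar_dica_alternativa : Prop := ∀ (cores : List Int), Dom_gerar_dica_alternativa cores → D_gerar_dica_alternativa cores → gerar_dica_alternativa cores ≠ gerar_dica_alternativa_alt cores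

-- ===== LEMMAS AND PROOFS =====
lemma pv_slice_last3 (cores : List Int) (h : 3 ≤ cores.length) :
    PySem.List.slice cores (some (-3)) none = cores.drop (cores.length - 3) := by
  rw [PySem.List.slice_from_neg_ofNat cores 3 (by omega)]

lemma pv_drop_len3 (cores : List Int) (h3 : 3 ≤ cores.length) :
    ∃ a b c, cores.drop (cores.length - 3) = [a, b, c] := by
  have hl : (cores.drop (cores.length - 3)).length = 3 := by
    simp [List.length_drop]; omega
  match hd : cores.drop (cores.length - 3) with
  | [a, b, c] => exact ⟨a, b, c, rfl⟩
  | [] | [_] | [_, _] | _ :: _ :: _ :: _ :: _ => simp [hd] at hl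

lemma pv_beq3 (x y z a b c : Int) :
    (((x, y, z) : Int × Int × Int) == (a, b, c)) = (decide (a = x) && decide (b = y) && decide (c = z)) := by
  by_cases h1 : a = x <;> by_cases h2 : b = y <;> by_cases h3 : c = z <;>
    subst_vars <;> simp_all <;> omega

lemma pvExatos_eq : pvExatos = PySem.Dict.mk
    [((1, 1, 1), (2, "VVV")), ((2, 2, 2), (1, "PPP")),
     ((1, 1, 2), (1, "VVP")), ((2, 2, 1), (2, "PPV")),
     ((1, 2, 2), (2, "VPP")), ((2, 1, 1), (1, "PVV")),
     ((1, 2, 1), (1, "VPV")), ((2, 1, 2), (2, "PVP"))] := by decide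

lemma pv_triple (a b c : Int) (h : ¬(a ≠ 0 ∧ (b = 0 ∨ c = 0))) :
    gerar_dica_alternativa [a, b, c] = gerar_dica_alternativa_alt [a, b, c] := by
  push_neg at h
  simp only [gerar_dica_alternativa, gerar_dica_alternativa_alt]
  norm_num [PySem.List.slice, pvUnpack3, pvLoopA, pvPadroes, pvExatos_eq, PySem.Dict.get?_mk_cons, PySem.Dict.get?, List.find?, pv_beq3]
  by_cases h0 : a = 0
  · subst h0
    simp [pvLoopA, pvPadroes, pvExatos_eq, PySem.Dict.get?_mk_cons, PySem.Dict.get?, List.find?, pv_beq3]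
  · have hbc := h h0
    by_cases ha1 : a = 1 <;> by_cases ha2 : a = 2 <;>
      by_cases hb1 : b = 1 <;> by_cases hb2 : b = 2 <;>
      by_cases hc1 : c = 1 <;> by_cases hc2 : c = 2 <;>
      simp_all [pvLoopA, pvPadroes, pvExatos_eq, PySem.Dict.get?_mk_cons, PySem.Dict.get?, List.find?, pv_beq3]

lemma pv_reduce (f : List Int → Option Int × Option String)
    (hf : ∀ cores, f cores =
      if cores.length < 3 then (none, none)
      else match PySem.List.slice cores (some (-3)) none with
        | [c1, c2, c3] => f [c1, c2, c3]
        | _ => (none, none))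
    (cores : List Int) (a b c : Int) (h3 : 3 ≤ cores.length)
    (hd : cores.drop (cores.length - 3) = [a, b, c]) :
    f cores = f [a, b, c] := by
  rw [hf cores, if_neg (by omega), pv_slice_last3 cores h3, hd, hf [a, b, c]]
  simp [PySem.List.slice]

lemma pvA_unfold (cores : List Int) : gerar_dica_alternativa cores =
    if cores.length < 3 then (none, none)
    else match PySem.List.slice cores (some (-3)) none with
      | [c1, c2, c3] => gerar_dica_alternativa [c1, c2, c3]
      | _ => (none, none) := by
  simp only [gerar_dica_alternativa]
  split_ifs with h
  · rfl
  · rcases pv_drop_len3 cores (by omega) with ⟨a, b, c, hd⟩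
    rw [pv_slice_last3 cores (by omega), hd]
    simp [PySem.List.slice]

lemma pvB_unfold (cores : List Int) : gerar_dica_alternativa_alt cores =
    if cores.length < 3 then (none, none)
    else match PySem.List.slice cores (some (-3)) none with
      | [c1, c2, c3] => gerar_dica_alternativa_alt [c1, c2, c3]
      | _ => (none, none) := by
  by_cases h : cores.length < 3
  · simp [gerar_dica_alternativa_alt, h]
  · rcases pv_drop_len3 cores (by omega) with ⟨a, b, c, hd⟩
    have hs : PySem.List.slice cores (some (-3)) none = [a, b, c] := by
      rw [pv_slice_last3 cores (by omega), hd]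
    simp only [gerar_dica_alternativa_alt, if_neg h, hs]
    simp [pvUnpack3, PySem.List.slice]

lemma pv_triple_ne (a b c : Int) (h1 : ¬ a = 0) (h23 : b = 0 ∨ c = 0) :
    gerar_dica_alternativa [a, b, c] ≠ gerar_dica_alternativa_alt [a, b, c] := by
  rcases h23 with rfl | rfl
  · simp_all [gerar_dica_alternativa, gerar_dica_alternativa_alt, pvUnpack3, PySem.List.slice,
      pvLoopA, pvPadroes, pvExatos_eq, PySem.Dict.get?_mk_cons, PySem.Dict.get?,
      List.find?, pv_beq3]
  · by_cases hb : b = 0 <;>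
      simp_all [gerar_dica_alternativa, gerar_dica_alternativa_alt, pvUnpack3, PySem.List.slice,
        pvLoopA, pvPadroes, pvExatos_eq, PySem.Dict.get?_mk_cons, PySem.Dict.get?,
        List.find?, pv_beq3]

-- ===== VERDICT =====
theorem gerar_dica_alternativa_spec : Claim_unchanged_gerar_dica_alternativa := by
  intro cores _ hD
  by_cases h3 : cores.length < 3
  · simp [gerar_dica_alternativa, gerar_dica_alternativa_alt, h3]
  · rcases pv_drop_len3 cores (by omega) with ⟨a, b, c, hd⟩
    rw [pv_reduce _ pvA_unfold cores a b c (by omega) hd,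
        pv_reduce _ pvB_unfold cores a b c (by omega) hd]
    apply pv_triple
    intro hcon
    exact hD ⟨by omega, by simp [hd, hcon.1], by rcases hcon.2 with h | h <;> simp [hd, h]⟩

theorem gerar_dica_alternativa_changed : Claim_changed_gerar_dica_alternativa := by
  unfold Claim_changed_gerar_dica_alternativa; decide

theorem gerar_dica_alternativa_tight : Claim_exact_gerar_dica_alternativa := by
  intro cores _ hD
  rcases hD with ⟨h3, h1, h23⟩
  rcases pv_drop_len3 cores h3 with ⟨a, b, c, hd⟩
  rw [pv_reduce _ pvA_unfold cores a b c h3 hd, pv_reduce _ pvB_unfold cores a b c h3 hd]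
  rw [hd] at h1 h23
  simp only [List.getD, List.getElem?_cons_zero, List.getElem?_cons_succ, Option.getD_some] at h1 h23
  exact pv_triple_ne a b c h1 h23
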